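-- pv_equiv track=rewrite | github.com/ohmjs/ohm | examples/ecmascript/scripts/dedent.py | dedent_grammar
-- ===== SOURCE A (Python) =====
-- import textwrap
--
-- def dedent_grammar(grammar_text: str):
--     grammar_lines = grammar_text.split('\n')
--
--     block_start = 0
--     blocks = []
--
--     for i, line in enumerate(grammar_lines):
--         if i > block_start and line.startswith('@line'):
--             blocks.append({
--                 "line": grammar_lines[block_start],
--                 "start": block_start + 1,
--                 "end": i,
--             })
--             block_start = i
--     blocks.append({
--         "line": grammar_lines[block_start],
--         "start": block_start + 1,
--         "end": len(grammar_lines) - 1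
--     })
--
--     dedented_blocks = []
--
--     for block in blocks:
--         line = block['line']
--         start = block['start']
--         end = block['end']
--         block_text = '\n'.join(grammar_lines[start:end])
--         dedented_block = textwrap.dedent(block_text)
--         dedented_blocks.append(line + '\n' + dedented_block)
--
--     dedented_grammar_text = '\n'.join(dedented_blocks)
--
--     return dedented_grammar_text
-- ===== SOURCE B (Python) =====
-- import textwrap
--
-- def dedent_grammar(grammar_text: str):
--     # One streaming pass, no intermediate block table: the text is treated as a
--     # sequence of newline-terminated lines (the piece after the final newline is
--     # not part of any block), each '@line' marker closes the current block.
--     lines = grammar_text.split('\n')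
--     blocks = []
--     header = lines[0]
--     body = []
--     for line in lines[1:-1]:
--         if line.startswith('@line'):
--             blocks.append(header + '\n' + textwrap.dedent('\n'.join(body)))
--             header, body = line, []
--         else:
--             body.append(line)
--     blocks.append(header + '\n' + textwrap.dedent('\n'.join(body)))
--     return '\n'.join(blocks)
-- ===== Notes on version B (the rewrite author's own statement) =====
-- stated objective: simpler
-- what changed: Replaces the two-pass design (build a list of {line,start,end} block descriptors, then dedent each by re-slicing the line list) with one streaming pass over lines[1:-1] that keeps only the current block's header and body buffer and emits each dedented block as soon as the next '@line' marker is seen; no index arithmetic or intermediate table remains.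
-- intended difference: When the text after the last newline (the final, unterminated line) starts with '@line', A emits an extra degenerate header-only block for that dangling marker, while B uniformly treats the piece after the last newline as outside every block; B's value is intended since A itself discards that final piece in every other case. — e.g. on dedent_grammar("x\n@line"): A returns "x\n\n@line\n", B returns "x\n"
import Mathlib
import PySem

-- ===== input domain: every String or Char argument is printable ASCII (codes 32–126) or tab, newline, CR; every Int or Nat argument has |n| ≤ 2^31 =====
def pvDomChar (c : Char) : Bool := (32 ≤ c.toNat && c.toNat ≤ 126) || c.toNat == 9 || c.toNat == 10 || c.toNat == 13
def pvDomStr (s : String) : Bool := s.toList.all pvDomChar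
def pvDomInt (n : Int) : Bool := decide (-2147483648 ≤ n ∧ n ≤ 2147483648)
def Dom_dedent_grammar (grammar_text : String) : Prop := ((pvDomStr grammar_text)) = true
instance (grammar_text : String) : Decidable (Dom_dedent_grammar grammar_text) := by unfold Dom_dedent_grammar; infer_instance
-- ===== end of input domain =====

-- B replaces A's two-pass design (build a {line,start,end} block table, then dedent each
-- block by re-slicing the line list) with one streaming pass over lines[1:-1] keeping only
-- the current block's header and body buffer (objective: simpler); on a dangling final
-- '@line' line B intentionally differs (see D_ below).

-- ===== SHARED HELPER: textwrap.dedent, ported by hand (PySem has no dedent; both A and B call it) =====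
-- CPython's textwrap.dedent works with two MULTILINE regexes ('^[ \t]+$' and
-- '(^[ \t]*)(?:[^ \t\n])') and a final '(?m)^<margin>' substitution.  Since '^'/'$' in
-- MULTILINE mode anchor exactly at '\n' boundaries and the patterns cannot cross or
-- contain '\n', every one of these operations acts independently on the '\n'-split
-- lines; the port below is that per-line reading, exact for every input string.
def pyDedentWsChar (c : Char) : Bool := c == ' ' || c == '\t'

-- text = _whitespace_only_re.sub('', text): a line of only spaces/tabs (nonempty) becomes empty
def pyDedentNorm (l : List Char) : List Char :=
  if !l.isEmpty && l.all pyDedentWsChar then [] else l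

-- one step of the margin loop ('for indent in indents: ...')
def pyDedentMerge (margin : Option (List Char)) (indent : List Char) : Option (List Char) :=
  match margin with
  | none => some indent
  | some m =>
    if m.isPrefixOf indent then some m
    else if indent.isPrefixOf m then some indent
    else
      -- inner 'for i, (x, y) in enumerate(zip(margin, indent)): if x != y: margin = margin[:i]; break'
      some (((m.zip indent).takeWhile (fun p => p.1 == p.2)).map Prod.fst)

def pyDedent (text : List Char) : List Char :=
  let lines := (PySem.Chars.splitOn text ['\n']).map pyDedentNorm
  -- indents = _leading_whitespace_re.findall(text): for each line with a non-space/tab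
  -- character, its leading run of spaces/tabs
  let indents := (lines.filter (fun l => l.any (fun c => !pyDedentWsChar c))).map
      (fun l => l.takeWhile pyDedentWsChar)
  let margin := indents.foldl pyDedentMerge none
  match margin with
  | none => PySem.Chars.join ['\n'] lines
  | some m =>
    -- 'if margin: text = re.sub(r'(?m)^' + margin, '', text)' (margin is spaces/tabs,
    -- so the pattern matches it literally at each line start)
    if !m.isEmpty then
      PySem.Chars.join ['\n'] (lines.map (fun l => if m.isPrefixOf l then l.drop m.length else l))
    else PySem.Chars.join ['\n'] lines

-- ===== PORT A =====
-- loop body of A's first pass ('for i, line in enumerate(grammar_lines): ...');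
-- the {line,start,end} dict with fixed keys is the triple (line, start, end)
def stepA (glines : List (List Char)) (st : Int × List (List Char × Int × Int))
    (p : Int × List Char) : Int × List (List Char × Int × Int) :=
  if decide (p.1 > st.1) && PySem.Chars.startswith p.2 ['@','l','i','n','e'] then
    (p.1, st.2 ++ [(PySem.List.pyGetD glines st.1 [], st.1 + 1, p.1)])
  else st

def dedent_grammar (grammar_text : String) : String :=
  let glines := PySem.Chars.splitOn grammar_text.toList ['\n']
  let st := (PySem.List.enumerate glines).foldl (stepA glines) (0, [])
  let blocks := st.2 ++ [(PySem.List.pyGetD glines st.1 [], st.1 + 1, PySem.List.len glines - 1)]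
  String.ofList (PySem.Chars.join ['\n'] (blocks.map (fun b =>
    b.1 ++ '\n' :: pyDedent (PySem.Chars.join ['\n']
      (PySem.List.slice glines (some b.2.1) (some b.2.2))))))

-- ===== PORT B =====
-- loop body of B's single pass: state (header, body, blocks)
def stepB (st : List Char × List (List Char) × List (List Char)) (line : List Char) :
    List Char × List (List Char) × List (List Char) :=
  if PySem.Chars.startswith line ['@','l','i','n','e'] then
    (line, [], st.2.2 ++ [st.1 ++ '\n' :: pyDedent (PySem.Chars.join ['\n'] st.2.1)])
  else (st.1, st.2.1 ++ [line], st.2.2)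

def dedent_grammar_alt (grammar_text : String) : String :=
  let glines := PySem.Chars.splitOn grammar_text.toList ['\n']
  -- lines[0] (split always yields at least one line) and the loop over lines[1:-1]
  let st := (PySem.List.slice glines (some 1) (some (-1))).foldl stepB
      (PySem.List.pyGetD glines 0 [], [], [])
  String.ofList (PySem.Chars.join ['\n'] (st.2.2 ++
    [st.1 ++ '\n' :: pyDedent (PySem.Chars.join ['\n'] st.2.1)]))

-- ===== PRECONDITION & SPEC =====
-- When the final, unterminated line (the text after the last newline) starts with '@line',
-- A emits an extra degenerate header-only block for that dangling marker, while B treats the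
-- piece after the last newline as outside every block (as A itself does in every other case).
def D_dedent_grammar (grammar_text : String) : Prop :=
  2 ≤ ((PySem.Str.split? grammar_text "\n").getD []).length ∧
  PySem.Str.startswith (((PySem.Str.split? grammar_text "\n").getD []).getLastD "")
    "@line" = true
instance (grammar_text : String) : Decidable (D_dedent_grammar grammar_text) := by
  unfold D_dedent_grammar; infer_instance

def Spec_dedent_grammar (grammar_text : String) (out : String) : Prop :=
  ¬ D_dedent_grammar grammar_text → out = dedent_grammar_alt grammar_text
instance (grammar_text : String) (out : String) : Decidable (Spec_dedent_grammar grammar_text out) := by unfold Spec_dedent_grammar; infer_instance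

def pvDiffWitness_dedent_grammar : String := "x\n@line"
def pvDiffWitnessOut_dedent_grammar : String × String := ("x\n\n@line\n", "x\n")

-- ===== CLAIM (what is proved, stated in full; the proofs are below) =====
def Claim_unchanged_dedent_grammar : Prop := ∀ (grammar_text : String), Dom_dedent_grammar grammar_text → Spec_dedent_grammar grammar_text (dedent_grammar grammar_text)
def Claim_changed_dedent_grammar : Prop := Dom_dedent_grammar (pvDiffWitness_dedent_grammar) ∧ D_dedent_grammar (pvDiffWitness_dedent_grammar) ∧ dedent_grammar (pvDiffWitness_dedent_grammar) = pvDiffWitnessOut_dedent_grammar.1 ∧ dedent_grammar_alt (pvDiffWitness_dedent_grammar) = pvDiffWitnessOut_dedent_grammar.2 ∧ pvDiffWitnessOut_dedent_grammar.1 ≠ pvDiffWitnessOut_dedent_grammar.2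
def Claim_exact_dedent_grammar : Prop := ∀ (grammar_text : String), Dom_dedent_grammar grammar_text → D_dedent_grammar grammar_text → dedent_grammar grammar_text ≠ dedent_grammar_alt grammar_text

-- ===== LEMMAS AND PROOFS =====

lemma getLastD_toList (parts : List String) :
    (parts.map String.toList).getLastD [] = (parts.getLastD "").toList := by
  induction parts with
  | nil => rfl
  | cons a tl ih =>
    cases tl with
    | nil => rfl
    | cons b tl' => simpa using ih

-- D_, stated at the Str level, read back through the Chars-level split the ports use
lemma D_iff (g : String) :
    D_dedent_grammar g ↔
      2 ≤ (PySem.Chars.splitOn g.toList ['\n']).length ∧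
      PySem.Chars.startswith ((PySem.Chars.splitOn g.toList ['\n']).getLastD [])
        ['@','l','i','n','e'] = true := by
  have h1 := PySem.Str.split?_map g "\n"
  rw [show PySem.Chars.split? g.toList ("\n" : String).toList
        = some (PySem.Chars.splitOn g.toList ['\n']) by simp [PySem.Chars.split?]] at h1
  cases hp : PySem.Str.split? g "\n" with
  | none => rw [hp] at h1; simp at h1
  | some parts =>
    rw [hp] at h1
    simp only [Option.map_some] at h1
    have h1' : parts.map String.toList = PySem.Chars.splitOn g.toList ['\n'] := by
      injection h1
    unfold D_dedent_grammar
    rw [hp, ← h1', PySem.Str.startswith_eq, getLastD_toList,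
      show ("@line" : String).toList = ['@','l','i','n','e'] from rfl]
    simp

-- what A renders for one block triple
def renderBlk (glines : List (List Char)) (b : List Char × Int × Int) : List Char :=
  b.1 ++ '\n' :: pyDedent (PySem.Chars.join ['\n']
    (PySem.List.slice glines (some b.2.1) (some b.2.2)))

-- A's post-loop finalisation, as the list that gets joined
def wrapA (glines : List (List Char)) (st : Int × List (List Char × Int × Int)) :
    List (List Char) :=
  (st.2 ++ [(PySem.List.pyGetD glines st.1 [], st.1 + 1, PySem.List.len glines - 1)]).map
    (renderBlk glines)

-- B's post-loop finalisation, as the list that gets joined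
def wrapB (st : List Char × List (List Char) × List (List Char)) : List (List Char) :=
  st.2.2 ++ [st.1 ++ '\n' :: pyDedent (PySem.Chars.join ['\n'] st.2.1)]

lemma loop_key (glines : List (List Char)) (rest : List (List Char)) :
    ∀ (k bs : Int) (blocks : List (List Char × Int × Int)) (header : List Char)
      (buf out : List (List Char)),
      0 ≤ bs → bs < k → rest = glines.dropLast.drop k.toNat →
      k.toNat ≤ glines.length - 1 → glines ≠ [] →
      header = PySem.List.pyGetD glines bs [] →
      buf = (glines.drop (bs+1).toNat).take (k.toNat - (bs+1).toNat) →
      out = blocks.map (renderBlk glines) →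
      wrapB (rest.foldl stepB (header, buf, out))
        = wrapA glines ((PySem.List.enumerate rest k).foldl (stepA glines) (bs, blocks)) := by
  induction rest with
  | nil =>
    intro k bs blocks header buf out h0 h1 h2 h3 hne h4 h5 h6
    have hlen : k.toNat = glines.length - 1 := by
      have := List.drop_eq_nil_iff.mp h2.symm
      rw [List.length_dropLast] at this
      omega
    have hglen : 1 ≤ glines.length := List.length_pos_iff.mpr hne
    have hslice : PySem.Chars.join ['\n'] buf
        = PySem.Chars.join ['\n'] (PySem.List.slice glines (some (bs+1)) (some ((glines.length : Int) - 1))) := by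
      rw [h5, PySem.List.slice_toNat glines (by omega) (by omega)]
      congr 2
      omega
    simp only [PySem.List.enumerate_nil, List.foldl_nil]
    unfold wrapA wrapB
    simp only [List.map_append, List.map_cons, List.map_nil, renderBlk, PySem.List.len_eq]
    rw [h6, h4, hslice]
  | cons line tl ih =>
    intro k bs blocks header buf out h0 h1 h2 h3 hne h4 h5 h6
    have hk' : k.toNat < glines.length - 1 := by
      by_contra hc
      rw [List.drop_eq_nil_iff.mpr (by rw [List.length_dropLast]; omega)] at h2
      exact List.cons_ne_nil _ _ h2
    have hline : glines[k.toNat]? = some line := by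
      have h01 : (glines.dropLast.drop k.toNat)[0]? = some line := by rw [← h2]; rfl
      rw [List.getElem?_drop, Nat.add_zero, List.getElem?_dropLast] at h01
      rw [← h01]; simp [hk']
    have htl : tl = glines.dropLast.drop (k+1).toNat := by
      have : glines.dropLast.drop (k.toNat + 1) = (glines.dropLast.drop k.toNat).tail := by
        rw [← List.drop_drop, List.drop_one]
      rw [show (k+1).toNat = k.toNat + 1 by omega, this, ← h2]
      rfl
    rw [PySem.List.enumerate_cons, List.foldl_cons, List.foldl_cons]
    cases hc : PySem.Chars.startswith line ['@','l','i','n','e'] with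
    | false =>
      rw [show stepA glines (bs, blocks) (k, line) = (bs, blocks) by
        simp [stepA, hc]]
      rw [show stepB (header, buf, out) line = (header, buf ++ [line], out) by
        simp [stepB, hc]]
      refine ih (k+1) bs blocks header (buf ++ [line]) out h0 (by omega) htl (by omega) hne h4 ?_ h6
      rw [h5, show (k+1).toNat - (bs+1).toNat = (k.toNat - (bs+1).toNat) + 1 by omega,
        List.take_add_one, List.getElem?_drop,
        show (bs+1).toNat + (k.toNat - (bs+1).toNat) = k.toNat by omega, hline]
      rfl
    | true =>
      rw [show stepA glines (bs, blocks) (k, line)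
            = (k, blocks ++ [(PySem.List.pyGetD glines bs [], bs + 1, k)]) by
        simp [stepA, hc, h1]]
      rw [show stepB (header, buf, out) line
            = (line, [], out ++ [header ++ '\n' :: pyDedent (PySem.Chars.join ['\n'] buf)]) by
        simp [stepB, hc]]
      refine ih (k+1) k _ line [] _ (by omega) (by omega) htl (by omega) hne ?_ (by simp) ?_
      · rw [PySem.List.pyGetD_eq_getElem glines [] (by omega) (by omega)]
        obtain ⟨hk2, heq⟩ := List.getElem?_eq_some_iff.mp hline
        exact heq.symm
      · rw [h6, List.map_append, List.map_cons, List.map_nil, h4]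
        simp only [renderBlk]
        rw [h5, PySem.List.slice_toNat glines (by omega) (by omega)]

-- lines[1:-1] in B's port, in structural form
lemma slice_one_neg_one (l0 : List Char) (rest : List (List Char)) :
    PySem.List.slice (l0 :: rest) (some 1) (some (-1)) = rest.dropLast := by
  simp [PySem.List.slice, List.dropLast_eq_take]

-- '\n'.join over a final appended block
lemma join_concat (xs : List (List Char)) (y : List Char) (h : xs ≠ []) :
    PySem.Chars.join ['\n'] (xs ++ [y])
      = PySem.Chars.join ['\n'] xs ++ '\n' :: y := by
  induction xs with
  | nil => exact absurd rfl h
  | cons a tl ih =>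
    cases tl with
    | nil => simp [PySem.Chars.join_cons_cons, PySem.Chars.join_singleton]
    | cons b tl' =>
      have ih' := ih (List.cons_ne_nil _ _)
      simp only [List.cons_append] at ih' ⊢
      rw [PySem.Chars.join_cons_cons, PySem.Chars.join_cons_cons, ih']
      simp [List.append_assoc]

-- the marker index kept by A's first pass stays below the running line index
lemma stepA_fst_lt (glines : List (List Char)) (l : List (List Char)) :
    ∀ (k : Int) (st : Int × List (List Char × Int × Int)), st.1 < k →
      ((PySem.List.enumerate l k).foldl (stepA glines) st).1 < k + l.length := by
  induction l with
  | nil => intro k st h; simpa using by omega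
  | cons x tl ih =>
    intro k st h
    rw [PySem.List.enumerate_cons, List.foldl_cons]
    have hst : (stepA glines st (k, x)).1 < k + 1 := by
      unfold stepA
      split
      · show k < k + 1; omega
      · omega
    have := ih (k + 1) (stepA glines st (k, x)) hst
    simp only [List.length_cons]
    omega

-- shared head of both main proofs: with glines = l0 :: (ys ++ [last]), A's first pass up to
-- (but excluding) the final line agrees with B's streaming pass, as the joined block lists
lemma main_key (l0 last : List Char) (ys : List (List Char)) :
    wrapB ((PySem.List.slice (l0 :: (ys ++ [last])) (some 1) (some (-1))).foldl stepB
        (PySem.List.pyGetD (l0 :: (ys ++ [last])) 0 [], [], []))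
      = wrapA (l0 :: (ys ++ [last]))
          ((PySem.List.enumerate ys 1).foldl (stepA (l0 :: (ys ++ [last]))) (0, [])) := by
  rw [slice_one_neg_one, List.dropLast_concat]
  refine loop_key (l0 :: (ys ++ [last])) ys 1 0 [] _ [] [] (by omega) (by omega) ?_
    (by simp) (List.cons_ne_nil _ _) rfl (by simp) rfl
  rw [show (l0 :: (ys ++ [last])).dropLast = l0 :: ys by
    rw [← List.cons_append, List.dropLast_concat]]
  rfl

theorem dedent_grammar_spec : Claim_unchanged_dedent_grammar := by
  intro g _ hnd
  unfold dedent_grammar dedent_grammar_alt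
  cases h : PySem.Chars.splitOn g.toList ['\n'] with
  | nil => rfl
  | cons l0 tl =>
    dsimp only
    rcases List.eq_nil_or_concat tl with htl | ⟨ys, last, htl⟩
    all_goals try rw [List.concat_eq_append] at htl
    · subst htl
      rw [show PySem.List.enumerate [l0] = [((0:Int), l0)] by rfl, List.foldl_cons,
        show stepA [l0] (0, []) (0, l0) = (0, []) by simp [stepA],
        slice_one_neg_one]
      rfl
    · subst htl
      have hlast : PySem.Chars.startswith last ['@','l','i','n','e'] = false := by
        rw [D_iff g, h] at hnd
        simp only [not_and] at hnd
        have h2 : (l0 :: (ys ++ [last])).getLastD [] = last := by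
          rw [← List.cons_append, List.getLastD_concat]
        have := hnd (by simp)
        rw [h2] at this
        simpa using this
      rw [show PySem.List.enumerate (l0 :: (ys ++ [last]))
            = (0, l0) :: (PySem.List.enumerate ys 1
                ++ [((1 : Int) + ys.length, last)]) by
          rw [PySem.List.enumerate_cons, PySem.List.enumerate_append]; norm_num,
        List.foldl_cons, show stepA (l0 :: (ys ++ [last])) (0, []) (0, l0) = (0, []) by
          simp [stepA],
        List.foldl_append, List.foldl_cons, List.foldl_nil]
      rw [show stepA (l0 :: (ys ++ [last]))
            ((PySem.List.enumerate ys 1).foldl (stepA (l0 :: (ys ++ [last]))) (0, []))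
            ((1 : Int) + ys.length, last)
          = (PySem.List.enumerate ys 1).foldl (stepA (l0 :: (ys ++ [last]))) (0, []) by
        unfold stepA; rw [hlast]; simp]
      exact congrArg (fun l => String.ofList (PySem.Chars.join ['\n'] l)) (main_key l0 last ys).symm

theorem dedent_grammar_changed : Claim_changed_dedent_grammar := by
  unfold Claim_changed_dedent_grammar; decide

theorem dedent_grammar_tight : Claim_exact_dedent_grammar := by
  intro g _ hD
  obtain ⟨hlen2, hstart⟩ := (D_iff g).mp hD
  cases h : PySem.Chars.splitOn g.toList ['\n'] with
  | nil => rw [h] at hlen2; simp at hlen2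
  | cons l0 tl =>
    rcases List.eq_nil_or_concat tl with htl | ⟨ys, last, htl⟩
    · rw [htl] at h; rw [h] at hlen2; simp at hlen2
    · rw [List.concat_eq_append] at htl
      subst htl
      rw [h, show (l0 :: (ys ++ [last])).getLastD [] = last by
        rw [← List.cons_append, List.getLastD_concat]] at hstart
      have hS := stepA_fst_lt (l0 :: (ys ++ [last])) ys 1 (0, []) (by omega)
      set S := (PySem.List.enumerate ys 1).foldl (stepA (l0 :: (ys ++ [last]))) (0, [])
        with hSdef
      have hlen1 : PySem.List.len (l0 :: (ys ++ [last])) - 1 = (1 : Int) + ys.length := by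
        rw [PySem.List.len_eq]; simp; omega
      have hfinal : renderBlk (l0 :: (ys ++ [last]))
          (PySem.List.pyGetD (l0 :: (ys ++ [last])) ((1 : Int) + ys.length) [],
           (1 : Int) + ys.length + 1, (1 : Int) + ys.length) = last ++ ['\n'] := by
        have hget : PySem.List.pyGetD (l0 :: (ys ++ [last])) ((1 : Int) + ys.length) []
            = last := by
          rw [PySem.List.pyGetD_eq_getElem _ [] (by omega) (by simp; omega)]
          have hg2 : (l0 :: (ys ++ [last]))[((1 : Int) + ys.length).toNat]? = some last := by
            rw [show ((1 : Int) + ys.length).toNat = ys.length + 1 by omega]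
            simp
          obtain ⟨_, heq⟩ := List.getElem?_eq_some_iff.mp hg2
          exact heq
        have hsl : PySem.List.slice (l0 :: (ys ++ [last]))
            (some ((1 : Int) + ys.length + 1)) (some ((1 : Int) + ys.length)) = [] := by
          rw [PySem.List.slice_toNat _ (by omega) (by omega)]
          apply List.take_eq_nil_iff.mpr
          left
          omega
        unfold renderBlk
        rw [hget, hsl]
        rfl
      -- A's value, as the joined block list of its post-marker state
      have hA : (dedent_grammar g).toList
          = PySem.Chars.join ['\n'] (wrapA (l0 :: (ys ++ [last]))
              ((1 : Int) + ys.length,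
               S.2 ++ [(PySem.List.pyGetD (l0 :: (ys ++ [last])) S.1 [], S.1 + 1,
                        (1 : Int) + ys.length)])) := by
        unfold dedent_grammar
        rw [h]
        dsimp only
        rw [show PySem.List.enumerate (l0 :: (ys ++ [last]))
              = (0, l0) :: (PySem.List.enumerate ys 1 ++ [((1 : Int) + ys.length, last)]) by
            rw [PySem.List.enumerate_cons, PySem.List.enumerate_append]; norm_num,
          List.foldl_cons, show stepA (l0 :: (ys ++ [last])) (0, []) (0, l0) = (0, []) by
            simp [stepA],
          List.foldl_append, List.foldl_cons, List.foldl_nil, ← hSdef]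
        rw [show stepA (l0 :: (ys ++ [last])) S ((1 : Int) + ys.length, last)
              = ((1 : Int) + ys.length,
                 S.2 ++ [(PySem.List.pyGetD (l0 :: (ys ++ [last])) S.1 [], S.1 + 1,
                          (1 : Int) + ys.length)]) by
          unfold stepA
          have hc : decide (((1 : Int) + ys.length) > S.1) = true := by simp; omega
          simp [hc, hstart]]
        rw [String.toList_ofList]
        rfl
      -- split off the degenerate final block
      have hA2 : wrapA (l0 :: (ys ++ [last]))
            ((1 : Int) + ys.length,
             S.2 ++ [(PySem.List.pyGetD (l0 :: (ys ++ [last])) S.1 [], S.1 + 1,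
                      (1 : Int) + ys.length)])
          = wrapA (l0 :: (ys ++ [last])) S ++ [last ++ ['\n']] := by
        unfold wrapA
        rw [hlen1]
        simp only [List.map_append, List.map_cons, List.map_nil]
        rw [hfinal]
      -- B's value, as its joined block list
      have hB : (dedent_grammar_alt g).toList
          = PySem.Chars.join ['\n']
              (wrapB ((PySem.List.slice (l0 :: (ys ++ [last])) (some 1) (some (-1))).foldl
                stepB (PySem.List.pyGetD (l0 :: (ys ++ [last])) 0 [], [], []))) := by
        unfold dedent_grammar_alt
        rw [h]
        dsimp only
        rw [String.toList_ofList]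
        rfl
      intro heq
      have htl2 := congrArg String.toList heq
      rw [hA, hB, hA2, main_key l0 last ys,
        join_concat _ _ (by unfold wrapA; simp)] at htl2
      rw [← hSdef] at htl2
      have hlen3 := congrArg List.length htl2
      simp only [List.length_append, List.length_cons] at hlen3
      omega
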